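-- pv_equiv track=rewrite | github.com/cschatz/advent-of-code | advent/years/_2023/day14/solver.py | load
-- ===== SOURCE A (Python) =====
-- def load(col):
--     colsize = len(col)
--     i = 0
--     tot_load = 0
--     while True:
--         if i == colsize:
--             break
--         # find beginning of open space or rocks
--         while i < colsize and col[i] == "#":
--             i += 1
--         # count all Os until end or "#"
--         one_rock_load = len(col) - i
--         while i < colsize and col[i] != "#":
--             if col[i] == "O":
--                 tot_load += one_rock_load
--                 one_rock_load -= 1
--             i += 1
--     return tot_load
-- ===== SOURCE B (Python) =====
-- def load(col):
--     n = len(col)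
--     total = 0
--     start = 0  # index where the current '#'-free segment begins
--     k = 0      # number of 'O' rocks seen in the current segment
--     for i, c in enumerate(col):
--         if c == "#":
--             total += k * (n - start) - k * (k - 1) // 2
--             start = i + 1
--             k = 0
--         elif c == "O":
--             k += 1
--     total += k * (n - start) - k * (k - 1) // 2
--     return total
-- ===== Notes on version B (the rewrite author's own statement) =====
-- stated objective: simpler
-- what changed: Replaces A's nested while-loops that decrement a per-rock load with a single for-loop that counts rocks per '#'-free segment and adds a closed-form arithmetic-series sum at each flush.
import Mathlib
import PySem

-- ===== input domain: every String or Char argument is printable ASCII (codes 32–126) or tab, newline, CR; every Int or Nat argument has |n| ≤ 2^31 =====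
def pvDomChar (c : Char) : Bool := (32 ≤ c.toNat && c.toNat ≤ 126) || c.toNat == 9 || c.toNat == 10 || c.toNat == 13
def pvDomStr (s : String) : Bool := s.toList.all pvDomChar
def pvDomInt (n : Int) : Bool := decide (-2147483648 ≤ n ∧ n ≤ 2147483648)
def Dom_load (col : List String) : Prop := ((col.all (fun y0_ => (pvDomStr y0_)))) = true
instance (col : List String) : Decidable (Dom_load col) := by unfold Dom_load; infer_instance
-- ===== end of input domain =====

-- B replaces A's per-rock decrementing scan by a single pass that counts the rocks of each
-- '#'-free segment and flushes a closed-form arithmetic-series sum per segment (objective: simpler).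

-- ===== PORT A =====
-- Python's `while` loops advance i and stop at i = n, so they run at most n (outer: n + 1)
-- iterations; the fuel parameter only makes that same computation structurally total and the
-- fuel-exhausted branch is never reached on the actual calls (proved in the lemmas below).

-- inner `while i < colsize and col[i] == "#"` loop (col[i] is always in range here, so getD is exact)
def loadSkipHash (col : List String) (n : Nat) : Nat → Nat → Nat
  | 0, i => i
  | f + 1, i => if i < n ∧ col.getD i "" = "#" then loadSkipHash col n f (i + 1) else i

-- inner `while i < colsize and col[i] != "#"` loop, threading (one_rock_load, tot_load)
def loadScan (col : List String) (n : Nat) : Nat → Nat → Int → Int → Nat × Int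
  | 0, i, _, tot => (i, tot)
  | f + 1, i, orl, tot =>
    if i < n ∧ col.getD i "" ≠ "#" then
      if col.getD i "" = "O" then loadScan col n f (i + 1) (orl - 1) (tot + orl)
      else loadScan col n f (i + 1) orl tot
    else (i, tot)

-- outer `while True` loop; the reachable states satisfy i ≤ n, so `n ≤ i` is Python's `i == colsize`
def loadLoop (col : List String) (n : Nat) : Nat → Nat → Int → Int
  | 0, _, tot => tot
  | f + 1, i, tot =>
    if n ≤ i then tot
    else
      -- i = loadSkipHash …; (i, tot_load) after the scan = loadScan … (one_rock_load = n - i)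
      loadLoop col n f
        (loadScan col n n (loadSkipHash col n n i)
          ((n : Int) - (loadSkipHash col n n i : Int)) tot).1
        (loadScan col n n (loadSkipHash col n n i)
          ((n : Int) - (loadSkipHash col n n i : Int)) tot).2

def load (col : List String) : Int := loadLoop col col.length (col.length + 1) 0 0

-- ===== PORT B =====
-- `total += k * (n - start) - k * (k - 1) // 2`
def loadFlush (n tot start k : Int) : Int :=
  tot + k * (n - start) - PySem.Int.floordiv (k * (k - 1)) 2

-- the body of `for i, c in enumerate(col)` on state (total, start, k)
def loadStep (n : Int) (s : Int × Int × Int) (ic : Int × String) : Int × Int × Int :=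
  match s with
  | (tot, start, k) =>
    if ic.2 = "#" then (loadFlush n tot start k, ic.1 + 1, 0)
    else if ic.2 = "O" then (tot, start, k + 1)
    else s

def load_alt (col : List String) : Int :=
  let n : Int := col.length
  match (PySem.List.enumerate col).foldl (loadStep n) (0, 0, 0) with
  | (tot, start, k) => loadFlush n tot start k

-- ===== PRECONDITION & SPEC =====
def Spec_load (col : List String) (out : Int) : Prop := out = load_alt col
instance (col : List String) (out : Int) : Decidable (Spec_load col out) := by unfold Spec_load; infer_instance

-- ===== CLAIM (what is proved, stated in full; the proofs are below) =====
def Claim_equal_load : Prop := ∀ (col : List String), Dom_load col → Spec_load col (load col)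

-- ===== LEMMAS AND PROOFS =====

-- common characterisation: load of a suffix, `orl` = current one-rock load
def segG : List String → Int → Int
  | [], _ => 0
  | c :: r, orl =>
    if c = "#" then segG r (r.length : Int)
    else if c = "O" then orl + segG r (orl - 1)
    else segG r orl

def flushSt (n : Int) (s : Int × Int × Int) : Int := loadFlush n s.1 s.2.1 s.2.2

theorem drop_cons_of_lt (col : List String) (i : Nat) (h : i < col.length) :
    col.drop i = col.getD i "" :: col.drop (i + 1) := by
  rw [List.getD_eq_getElem col "" h]
  exact List.drop_eq_getElem_cons h

theorem loadSkipHash_le (col : List String) (n f i : Nat) :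
    i ≤ loadSkipHash col n f i := by
  induction f generalizing i with
  | zero => exact le_refl i
  | succ f ih =>
    rw [loadSkipHash]
    split
    · exact le_trans (by omega) (ih (i + 1))
    · exact le_refl i

theorem loadSkipHash_ub (col : List String) (n f i : Nat) (h : i ≤ n) :
    loadSkipHash col n f i ≤ n := by
  induction f generalizing i with
  | zero => exact h
  | succ f ih =>
    rw [loadSkipHash]
    split
    next hc => exact ih (i + 1) (by omega)
    next => exact h

theorem loadScan_le (col : List String) (n f i : Nat) (orl tot : Int) :
    i ≤ (loadScan col n f i orl tot).1 := by
  induction f generalizing i orl tot with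
  | zero => exact le_refl i
  | succ f ih =>
    rw [loadScan]
    split
    · split
      · exact le_trans (by omega) (ih (i + 1) (orl - 1) (tot + orl))
      · exact le_trans (by omega) (ih (i + 1) orl tot)
    · exact le_refl i

theorem loadScan_ub (col : List String) (n f i : Nat) (orl tot : Int) (h : i ≤ n) :
    (loadScan col n f i orl tot).1 ≤ n := by
  induction f generalizing i orl tot with
  | zero => exact h
  | succ f ih =>
    rw [loadScan]
    split
    next hc =>
      split
      · exact ih (i + 1) (orl - 1) (tot + orl) (by omega)
      · exact ih (i + 1) orl tot (by omega)
    next => exact h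

theorem load_progress (col : List String) (n i : Nat) (tot : Int) (hi : i < n) :
    i < (loadScan col n n (loadSkipHash col n n i)
      ((n : Int) - (loadSkipHash col n n i : Int)) tot).1 := by
  obtain ⟨m, rfl⟩ : ∃ m, n = m + 1 := ⟨n - 1, by omega⟩
  by_cases hc : col.getD i "" = "#"
  · have h1 : i + 1 ≤ loadSkipHash col (m + 1) (m + 1) i := by
      rw [loadSkipHash, if_pos ⟨hi, hc⟩]
      exact loadSkipHash_le col (m + 1) m (i + 1)
    have h2 := loadScan_le col (m + 1) (m + 1) (loadSkipHash col (m + 1) (m + 1) i)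
      (((m + 1 : Nat) : Int) - (loadSkipHash col (m + 1) (m + 1) i : Int)) tot
    omega
  · have h0 : loadSkipHash col (m + 1) (m + 1) i = i := by
      rw [loadSkipHash, if_neg (by tauto)]
    rw [h0, loadScan, if_pos ⟨hi, hc⟩]
    split
    · exact lt_of_lt_of_le (by omega) (loadScan_le col (m + 1) m (i + 1) _ _)
    · exact lt_of_lt_of_le (by omega) (loadScan_le col (m + 1) m (i + 1) _ _)

theorem skipHash_segG (col : List String) (f i : Nat) :
    segG (col.drop i) ((col.length : Int) - i) =
      segG (col.drop (loadSkipHash col col.length f i))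
        ((col.length : Int) - (loadSkipHash col col.length f i : Int)) := by
  induction f generalizing i with
  | zero => rfl
  | succ f ih =>
    rw [loadSkipHash]
    split
    next hc =>
      rw [drop_cons_of_lt col i hc.1]
      rw [segG, if_pos hc.2]
      have hl : ((col.drop (i + 1)).length : Int) = (col.length : Int) - ((i + 1 : Nat) : Int) := by
        rw [List.length_drop]; omega
      rw [hl]
      exact ih (i + 1)
    next => rfl

theorem scan_segG (col : List String) (f i : Nat) (orl tot : Int)
    (hn : i ≤ col.length) (hf : col.length ≤ f + i) :
    (loadScan col col.length f i orl tot).2 +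
        segG (col.drop (loadScan col col.length f i orl tot).1)
          ((col.length : Int) - ((loadScan col col.length f i orl tot).1 : Int)) =
      tot + segG (col.drop i) orl := by
  induction f generalizing i orl tot with
  | zero =>
    have : i = col.length := by omega
    subst this
    simp [loadScan, segG]
  | succ f ih =>
    rw [loadScan]
    split
    next hc =>
      split
      next hO =>
        rw [ih (i + 1) (orl - 1) (tot + orl) (by omega) (by omega),
          drop_cons_of_lt col i hc.1, segG, if_neg hc.2, if_pos hO]
        ring
      next hO =>
        rw [ih (i + 1) orl tot (by omega) (by omega),
          drop_cons_of_lt col i hc.1, segG, if_neg hc.2, if_neg hO]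
    next hc =>
      simp only
      by_cases hi : i < col.length
      · have hcc : col.getD i "" = "#" := by
          by_contra hx; exact hc ⟨hi, hx⟩
        rw [drop_cons_of_lt col i hi, segG, if_pos hcc, segG, if_pos hcc]
      · have : i = col.length := by omega
        subst this
        simp [segG]

theorem loadLoop_eq_segG (col : List String) (f i : Nat) (tot : Int)
    (hn : i ≤ col.length) (hf : col.length < f + i) :
    loadLoop col col.length f i tot = tot + segG (col.drop i) ((col.length : Int) - i) := by
  induction f generalizing i tot with
  | zero => omega
  | succ f ih =>
    rw [loadLoop]
    split
    next h =>
      have : i = col.length := by omega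
      subst this
      simp [segG]
    next h =>
      have hi : i < col.length := by omega
      have h1 : loadSkipHash col col.length col.length i ≤ col.length :=
        loadSkipHash_ub col col.length col.length i (by omega)
      have h2 : (loadScan col col.length col.length (loadSkipHash col col.length col.length i)
          ((col.length : Int) - (loadSkipHash col col.length col.length i : Int)) tot).1
            ≤ col.length :=
        loadScan_ub col col.length col.length _ _ tot h1
      have hp := load_progress col col.length i tot hi
      rw [ih _ _ h2 (by omega),
        scan_segG col col.length (loadSkipHash col col.length col.length i)
          ((col.length : Int) - (loadSkipHash col col.length col.length i : Int)) tot h1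
          (by omega),
        ← skipHash_segG col col.length i]

theorem load_eq_segG (col : List String) : load col = segG col (col.length : Int) := by
  have := loadLoop_eq_segG col (col.length + 1) 0 0 (by omega) (by omega)
  simpa [load] using this

theorem floordiv_flush (x k : Int) :
    PySem.Int.floordiv (x + 2 * k) 2 = PySem.Int.floordiv x 2 + k := by
  rw [PySem.Int.floordiv_eq_ediv_of_pos (by norm_num),
    PySem.Int.floordiv_eq_ediv_of_pos (by norm_num)]
  omega

theorem floordiv_zero_two : PySem.Int.floordiv ((0 : Int) * (0 - 1)) 2 = 0 := by
  rw [PySem.Int.floordiv_eq_ediv_of_pos (by norm_num)]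
  norm_num

theorem foldB_eq_segG (col : List String) (s : List String) (i : Int) (tot start k : Int)
    (hlen : i + (s.length : Int) = (col.length : Int)) :
    flushSt (col.length : Int)
        ((PySem.List.enumerate s i).foldl (loadStep (col.length : Int)) (tot, start, k)) =
      tot + k * ((col.length : Int) - start) - PySem.Int.floordiv (k * (k - 1)) 2 +
        segG s ((col.length : Int) - start - k) := by
  induction s generalizing i tot start k with
  | nil => simp [PySem.List.enumerate_nil, segG, flushSt, loadFlush]
  | cons c r ih =>
    rw [PySem.List.enumerate_cons, List.foldl_cons]
    have hlen' : (i + 1) + (r.length : Int) = (col.length : Int) := by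
      rw [List.length_cons] at hlen; push_cast at hlen ⊢; omega
    by_cases hc : c = "#"
    · rw [segG, if_pos hc]
      simp only [loadStep, hc, reduceIte]
      rw [ih (i + 1) (loadFlush (col.length : Int) tot start k) (i + 1) 0 hlen']
      have hr : ((r.length : Int)) = (col.length : Int) - (i + 1) - 0 := by omega
      rw [hr, floordiv_zero_two, loadFlush]
      ring
    · by_cases hO : c = "O"
      · rw [segG, if_neg hc, if_pos hO]
        simp only [loadStep, hO, String.reduceEq, reduceIte]
        rw [ih (i + 1) tot start (k + 1) hlen']
        have e1 : (k + 1) * ((k + 1) - 1) = k * (k - 1) + 2 * k := by ring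
        rw [e1, floordiv_flush]
        have e2 : (col.length : Int) - start - (k + 1) = (col.length : Int) - start - k - 1 := by
          ring
        rw [e2]
        ring
      · rw [segG, if_neg hc, if_neg hO]
        simp only [loadStep, hc, hO, reduceIte]
        exact ih (i + 1) tot start k hlen'

theorem match_flush (n : Int) (p : Int × Int × Int) :
    (match p with | (t, st, kk) => loadFlush n t st kk) = flushSt n p := by
  rcases p with ⟨t, st, kk⟩; rfl

theorem load_alt_eq_segG (col : List String) : load_alt col = segG col (col.length : Int) := by
  unfold load_alt
  rw [match_flush, foldB_eq_segG col col 0 0 0 0 (by omega)]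
  rw [floordiv_zero_two]
  ring_nf

-- ===== VERDICT (by name: the statement is the Claim_ definition above) =====
theorem load_spec : Claim_equal_load := by
  intro col _
  unfold Spec_load
  rw [load_eq_segG, load_alt_eq_segG]
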